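-- pv_equiv track=rewrite | github.com/rzinkstok/text-tools | citrix_licenses.py | sample_and_hold_graph
-- ===== SOURCE A (Python) =====
-- def sample_and_hold_graph(xs, ys):
--     xx = [xs[0]]
--     yy = [ys[0]]
--
--     for x, y in list(zip(xs, ys))[1:]:
--         xx.append(x)
--         xx.append(x)
--         yy.append(yy[-1])
--         yy.append(y)
--
--     return xx, yy
-- ===== SOURCE B (Python) =====
-- def sample_and_hold_graph(xs, ys):
--     n = min(len(xs), len(ys))
--     xx = [v for x in xs[:n] for v in (x, x)][1:]
--     yy = [v for y in ys[:n] for v in (y, y)][:-1]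
--     return xx, yy
-- ===== Notes on version B (the rewrite author's own statement) =====
-- stated objective: idiomatic
-- what changed: Replaces the joint stateful append loop over zipped pairs by building each coordinate array independently: duplicate every element of the (min-length-truncated) source and slice off the first x / last y.
-- outside the precondition, e.g. on sample_and_hold_graph([], []): A raises IndexError, B returns ([], [])
import Mathlib
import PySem

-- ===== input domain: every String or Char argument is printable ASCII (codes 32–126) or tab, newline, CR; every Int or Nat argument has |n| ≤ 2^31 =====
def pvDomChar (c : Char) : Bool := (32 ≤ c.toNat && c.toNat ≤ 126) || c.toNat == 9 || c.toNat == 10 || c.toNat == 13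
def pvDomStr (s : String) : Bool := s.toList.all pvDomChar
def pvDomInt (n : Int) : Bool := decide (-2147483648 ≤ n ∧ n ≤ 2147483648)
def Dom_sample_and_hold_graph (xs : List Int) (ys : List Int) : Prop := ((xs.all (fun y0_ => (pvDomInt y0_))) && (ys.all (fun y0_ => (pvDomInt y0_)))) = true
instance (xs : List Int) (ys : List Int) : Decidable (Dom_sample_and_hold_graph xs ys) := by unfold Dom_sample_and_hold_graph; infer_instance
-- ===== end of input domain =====

-- B builds each coordinate array independently (duplicate every element, then slice) instead of A's joint stateful loop; equivalence of return values is proved on nonempty inputs (A raises IndexError when either list is empty).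


-- ===== PORT A =====
-- the for-loop over list(zip(xs, ys))[1:] with its two accumulators xx, yy
-- (yy[-1] is taken with getLastD 0; yy is never empty at that point, it starts as [ys[0]])
def shLoop (p : List (Int × Int)) (xx yy : List Int) : List Int × List Int :=
  match p with
  | [] => (xx, yy)
  | (x, y) :: rest => shLoop rest (xx ++ [x, x]) (yy ++ [yy.getLastD 0, y])

def sample_and_hold_graph (xs : List Int) (ys : List Int) : List Int × List Int :=
  match PySem.List.pyGet? xs 0, PySem.List.pyGet? ys 0 with
  | some x0, some y0 => shLoop ((List.zip xs ys).drop 1) [x0] [y0]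
  | _, _ => ([], [])   -- IndexError in Python; excluded by Pre_

-- ===== PORT B =====
-- [v for x in l for v in (x, x)]
def dupEach (l : List Int) : List Int := l.flatMap (fun v => [v, v])

def sample_and_hold_graph_alt (xs : List Int) (ys : List Int) : List Int × List Int :=
  let n := min xs.length ys.length
  ((dupEach (xs.take n)).drop 1, (dupEach (ys.take n)).dropLast)

-- ===== PRECONDITION & SPEC =====
-- Pre_ excludes exactly the inputs on which A raises IndexError (xs[0] / ys[0] on an empty list); B returns ([], []) there.
def Pre_sample_and_hold_graph (xs : List Int) (ys : List Int) : Prop := xs ≠ [] ∧ ys ≠ []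
instance (xs : List Int) (ys : List Int) : Decidable (Pre_sample_and_hold_graph xs ys) := by unfold Pre_sample_and_hold_graph; infer_instance
def pvWitness_sample_and_hold_graph : List Int × List Int := ([1, 2, 3], [10, 20, 30])

def Spec_sample_and_hold_graph (xs : List Int) (ys : List Int) (out : List Int × List Int) : Prop := out = sample_and_hold_graph_alt xs ys
instance (xs : List Int) (ys : List Int) (out : List Int × List Int) : Decidable (Spec_sample_and_hold_graph xs ys out) := by unfold Spec_sample_and_hold_graph; infer_instance

-- ===== CLAIM (what is proved, stated in full; the proofs are below) =====
def Claim_equal_sample_and_hold_graph : Prop := ∀ (xs : List Int) (ys : List Int), Dom_sample_and_hold_graph xs ys → Pre_sample_and_hold_graph xs ys → Spec_sample_and_hold_graph xs ys (sample_and_hold_graph xs ys)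

-- ===== LEMMAS AND PROOFS =====
theorem dupEach_cons (a : Int) (l : List Int) : dupEach (a :: l) = a :: a :: dupEach l := by
  simp [dupEach]

theorem dupEach_nil : dupEach [] = [] := rfl

theorem map_fst_zip_take : ∀ (l l' : List Int), (List.zip l l').map Prod.fst = l.take l'.length := by
  intro l
  induction l with
  | nil => intro l'; simp
  | cons a t ih =>
    intro l'
    cases l' with
    | nil => simp
    | cons b t' => simp [ih t']

theorem map_snd_zip_take : ∀ (l l' : List Int), (List.zip l l').map Prod.snd = l'.take l.length := by
  intro l
  induction l with
  | nil => intro l'; simp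
  | cons a t ih =>
    intro l'
    cases l' with
    | nil => simp
    | cons b t' => simp [ih t']

theorem shLoop_eq : ∀ (p : List (Int × Int)) (xx yy : List Int) (c : Int),
    shLoop p xx (yy ++ [c]) =
      (xx ++ dupEach (p.map Prod.fst), yy ++ (dupEach (c :: p.map Prod.snd)).dropLast) := by
  intro p
  induction p with
  | nil =>
    intro xx yy c
    simp [shLoop, dupEach_cons, dupEach_nil]
  | cons hd rest ih =>
    intro xx yy c
    obtain ⟨x, y⟩ := hd
    have hlast : (yy ++ [c]).getLastD 0 = c := by simp
    have hstep : (yy ++ [c]) ++ [c, y] = (yy ++ [c, c]) ++ [y] := by simp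
    calc shLoop ((x, y) :: rest) xx (yy ++ [c])
        = shLoop rest (xx ++ [x, x]) ((yy ++ [c, c]) ++ [y]) := by
          simp [shLoop, hstep]
      _ = (xx ++ [x, x] ++ dupEach (rest.map Prod.fst),
            (yy ++ [c, c]) ++ (dupEach (y :: rest.map Prod.snd)).dropLast) := ih _ _ _
      _ = (xx ++ dupEach (((x, y) :: rest).map Prod.fst),
            yy ++ (dupEach (c :: ((x, y) :: rest).map Prod.snd)).dropLast) := by
          have hne : dupEach (y :: rest.map Prod.snd) ≠ [] := by
            simp [dupEach_cons]
          simp [dupEach_cons, List.dropLast_cons_of_ne_nil, List.append_assoc]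

theorem take_clamp (l : List Int) (k : ℕ) : l.take k = l.take (min k l.length) := by
  rw [← List.take_take, List.take_length]

theorem sample_and_hold_graph_spec : Claim_equal_sample_and_hold_graph := by
  intro xs ys _ hpre
  obtain ⟨hx, hy⟩ := hpre
  obtain ⟨x0, xs', rfl⟩ := List.exists_cons_of_ne_nil hx
  obtain ⟨y0, ys', rfl⟩ := List.exists_cons_of_ne_nil hy
  unfold Spec_sample_and_hold_graph sample_and_hold_graph sample_and_hold_graph_alt
  simp only [PySem.List.pyGet?, PySem.List.pyIdx?]
  norm_num
  have h := shLoop_eq (List.zip xs' ys') [x0] [] y0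
  simp only [List.nil_append] at h
  rw [h, map_fst_zip_take, map_snd_zip_take]
  rw [take_clamp xs' ys'.length, take_clamp ys' xs'.length, Nat.min_comm ys'.length xs'.length]
  simp [dupEach_cons]
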